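-- pv_equiv track=rewrite | github.com/dkw789/Smart-Backlog-Assistant | src/processors/backlog_analyzer.py | _analyze_priority_distribution
-- ===== SOURCE A (Python) =====
-- from typing import Any, Dict, List, Optional
--
-- def _analyze_priority_distribution(
--     items: List[Dict[str, Any]]
-- ) -> Dict[str, int]:
--     """Analyze the distribution of priorities in backlog items."""
--     distribution = {"high": 0, "medium": 0, "low": 0, "not_set": 0}
--
--     for item in items:
--         priority = item.get("priority", "").lower()
--         if priority in distribution:
--             distribution[priority] += 1
--         else:
--             distribution["not_set"] += 1
--
--     return distribution
-- ===== SOURCE B (Python) =====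
-- def _analyze_priority_distribution(items):
--     """Analyze the distribution of priorities in backlog items."""
--     norm = [item.get("priority", "").lower() for item in items]
--     high = norm.count("high")
--     medium = norm.count("medium")
--     low = norm.count("low")
--     return {
--         "high": high,
--         "medium": medium,
--         "low": low,
--         "not_set": len(items) - high - medium - low,
--     }
-- ===== Notes on version B (the rewrite author's own statement) =====
-- stated objective: alternative
-- what changed: Replaces the per-item if/else dict bucketing with a normalize-then-count decomposition: build the list of lowercased priorities once, count the three named categories directly, and derive not_set arithmetically as len(items) minus those counts.
import Mathlib
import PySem

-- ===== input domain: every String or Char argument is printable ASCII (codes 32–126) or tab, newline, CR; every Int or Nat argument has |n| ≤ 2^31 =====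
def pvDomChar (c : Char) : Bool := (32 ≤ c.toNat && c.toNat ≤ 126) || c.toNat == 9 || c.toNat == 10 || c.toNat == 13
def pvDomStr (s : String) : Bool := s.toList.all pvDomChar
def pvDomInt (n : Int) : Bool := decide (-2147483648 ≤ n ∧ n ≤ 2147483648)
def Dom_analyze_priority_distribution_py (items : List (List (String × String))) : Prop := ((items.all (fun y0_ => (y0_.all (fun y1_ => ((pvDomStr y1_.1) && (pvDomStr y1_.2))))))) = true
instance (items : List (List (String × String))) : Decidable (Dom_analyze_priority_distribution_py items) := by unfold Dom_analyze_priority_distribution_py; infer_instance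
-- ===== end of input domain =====

-- B replaces the per-item if/else bucketing with normalize-then-count (count the three named priorities, derive not_set as length minus their sum); same cost, different decomposition.
-- ===== PORT A =====
def pvNormPriority (item : List (String × String)) : String :=
  PySem.Str.lower (PySem.Dict.getD (PySem.Dict.mk item) "priority" "")

def analyze_priority_distribution_py (items : List (List (String × String))) : List (String × Int) :=
  (items.foldl (fun dist item =>
      let priority := pvNormPriority item
      if PySem.Dict.contains dist priority then dist.modify priority 0 (· + 1)
      else dist.modify "not_set" 0 (· + 1))
    (PySem.Dict.mk [("high", 0), ("medium", 0), ("low", 0), ("not_set", 0)])).items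

-- ===== PORT B =====
def analyze_priority_distribution_py_alt (items : List (List (String × String))) : List (String × Int) :=
  let norm := items.map pvNormPriority
  let high : Int := norm.count "high"
  let medium : Int := norm.count "medium"
  let low : Int := norm.count "low"
  [("high", high), ("medium", medium), ("low", low),
   ("not_set", (items.length : Int) - high - medium - low)]

-- ===== PRECONDITION & SPEC =====
def Spec_analyze_priority_distribution_py (items : List (List (String × String))) (out : List (String × Int)) : Prop := out = analyze_priority_distribution_py_alt items
instance (items : List (List (String × String))) (out : List (String × Int)) : Decidable (Spec_analyze_priority_distribution_py items out) := by unfold Spec_analyze_priority_distribution_py; infer_instance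

-- ===== CLAIM (what is proved, stated in full; the proofs are below) =====
def Claim_equal_analyze_priority_distribution_py : Prop := ∀ (items : List (List (String × String))), Dom_analyze_priority_distribution_py items → Spec_analyze_priority_distribution_py items (analyze_priority_distribution_py items)

-- ===== LEMMAS AND PROOFS =====


lemma pyLoopA (items : List (List (String × String))) (h m l s : Int) :
    items.foldl (fun dist item =>
        let priority := pvNormPriority item
        if PySem.Dict.contains dist priority then dist.modify priority 0 (· + 1)
        else dist.modify "not_set" 0 (· + 1))
      (PySem.Dict.mk [("high", h), ("medium", m), ("low", l), ("not_set", s)])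
    = PySem.Dict.mk
        [("high", h + ((items.map pvNormPriority).count "high" : Int)),
         ("medium", m + ((items.map pvNormPriority).count "medium" : Int)),
         ("low", l + ((items.map pvNormPriority).count "low" : Int)),
         ("not_set", s + ((items.length : Int)
            - ((items.map pvNormPriority).count "high" : Int)
            - ((items.map pvNormPriority).count "medium" : Int)
            - ((items.map pvNormPriority).count "low" : Int)))] := by
  induction items generalizing h m l s with
  | nil => simp
  | cons x xs ih =>
    simp only [List.foldl_cons, List.map_cons, List.count_cons, List.length_cons]
    by_cases h1 : pvNormPriority x = "high"
    · simp only [h1]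
      rw [if_pos (by simp [PySem.Dict.contains])]
      rw [show (PySem.Dict.mk [("high", h), ("medium", m), ("low", l), ("not_set", s)]).modify "high" 0 (· + 1)
            = PySem.Dict.mk [("high", h + 1), ("medium", m), ("low", l), ("not_set", s)] by
        simp [PySem.Dict.modify, PySem.Dict.insert, PySem.Dict.getD, PySem.Dict.get?]]
      rw [ih]
      apply PySem.Dict.ext
      simp
      omega
    · by_cases h2 : pvNormPriority x = "medium"
      · simp only [h2]
        rw [if_pos (by simp [PySem.Dict.contains])]
        rw [show (PySem.Dict.mk [("high", h), ("medium", m), ("low", l), ("not_set", s)]).modify "medium" 0 (· + 1)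
              = PySem.Dict.mk [("high", h), ("medium", m + 1), ("low", l), ("not_set", s)] by
          simp [PySem.Dict.modify, PySem.Dict.insert, PySem.Dict.getD, PySem.Dict.get?]]
        rw [ih]
        apply PySem.Dict.ext
        simp
        omega
      · by_cases h3 : pvNormPriority x = "low"
        · simp only [h3]
          rw [if_pos (by simp [PySem.Dict.contains])]
          rw [show (PySem.Dict.mk [("high", h), ("medium", m), ("low", l), ("not_set", s)]).modify "low" 0 (· + 1)
                = PySem.Dict.mk [("high", h), ("medium", m), ("low", l + 1), ("not_set", s)] by
            simp [PySem.Dict.modify, PySem.Dict.insert, PySem.Dict.getD, PySem.Dict.get?]]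
          rw [ih]
          apply PySem.Dict.ext
          simp
          omega
        · have hmod : (PySem.Dict.mk [("high", h), ("medium", m), ("low", l), ("not_set", s)]).modify "not_set" 0 (· + 1)
              = PySem.Dict.mk [("high", h), ("medium", m), ("low", l), ("not_set", s + 1)] := by
            simp [PySem.Dict.modify, PySem.Dict.insert, PySem.Dict.getD, PySem.Dict.get?]
          by_cases h4 : pvNormPriority x = "not_set"
          · simp only [h4]
            rw [if_pos (by simp [PySem.Dict.contains]), hmod, ih]
            apply PySem.Dict.ext
            simp
            omega
          · rw [if_neg (by
                simp [PySem.Dict.contains, Ne.symm h1, Ne.symm h2, Ne.symm h3, Ne.symm h4])]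
            rw [hmod, ih]
            apply PySem.Dict.ext
            simp [h1, h2, h3]
            omega

-- ===== VERDICT (by name: the statement is the Claim_ definition above) =====
theorem analyze_priority_distribution_py_spec : Claim_equal_analyze_priority_distribution_py := by
  intro items _
  show analyze_priority_distribution_py items = analyze_priority_distribution_py_alt items
  unfold analyze_priority_distribution_py analyze_priority_distribution_py_alt
  rw [pyLoopA]
  simp
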